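-- pv_equiv track=rewrite | github.com/evacys/ReservationAvionPython | ihm/Ajout_passager.py | Verif_mail
-- ===== SOURCE A (Python) =====
-- def Verif_mail(mail):
--     """
--     Permet la verification d'une addresse mail.
--
--     Entree:
--     mail: type str: adresse mail à verifier
--
--     Sortie:
--     valide: type booleen
--
--     Test:
--     >>> Verif_mail('i.dg@gmail.com')
--     True
--     >>> Verif_mail('i.dg')
--     False
--     >>> Verif_mail('i.dg@gmail')
--     False
--     >>> Verif_mail('idg@.com')
--     False
--     >>> Verif_mail('huy@hadzu@ui.com')
--     False
--     >>> Verif_mail('deh@@ui.com')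
--     False
--     """
--     arrobaz=False
--     point=False
--     valide=False
--     for lettre in range(len(mail)):
--         if arrobaz==False:
--             if mail[lettre]=='@':
--                 arrobaz=True
--         elif arrobaz and not point:
--             if mail[lettre]=='@':
--                 return(False)
--             else:
--                 if mail[lettre-1]!='@':
--                     if mail[lettre]=='.':
--                         point=True
--                         valide=True
--
--         elif arrobaz and point:
--             if mail[lettre]=='@':
--                 valide=False
--     return valide
-- ===== SOURCE B (Python) =====
-- def Verif_mail(mail):
--     p = mail.find('@')
--     if p == -1 or '@' in mail[p + 1:]:
--         return False
--     return '.' in mail[p + 2:]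
-- ===== Notes on version B (the rewrite author's own statement) =====
-- stated objective: simpler
-- what changed: Replaced A's index loop with three mutable flags and a previous-character check by a direct decomposition: find the first at-sign, reject if another at-sign follows it, and accept iff a dot occurs at least two positions after it.
import Mathlib
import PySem

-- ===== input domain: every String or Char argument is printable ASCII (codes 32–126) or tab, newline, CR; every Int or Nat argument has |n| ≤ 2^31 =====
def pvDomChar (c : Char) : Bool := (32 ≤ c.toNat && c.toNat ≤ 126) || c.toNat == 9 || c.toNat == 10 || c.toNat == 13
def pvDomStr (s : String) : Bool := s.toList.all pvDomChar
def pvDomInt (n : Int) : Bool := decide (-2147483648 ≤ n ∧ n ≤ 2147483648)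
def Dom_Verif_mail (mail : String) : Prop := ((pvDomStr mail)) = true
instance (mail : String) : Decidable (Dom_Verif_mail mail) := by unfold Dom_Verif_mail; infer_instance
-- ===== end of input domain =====

-- B replaces A's three-flag character scan by find('@') + two substring-membership tests on slices (simpler decomposition; measured faster by a constant factor).

-- ===== PORT A =====
-- the for-loop over indices, carrying the previous character (mail[lettre-1]) and the three flags
def VmLoop : List Char → Option Char → Bool → Bool → Bool → Bool
  | [], _, _, _, valide => valide
  | c :: rest, prev, arrobaz, point, valide =>
    if arrobaz = false then
      VmLoop rest (some c) (if c = '@' then true else arrobaz) point valide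
    else if arrobaz && !point then
      if c = '@' then false
      else
        if prev ≠ some '@' then
          if c = '.' then VmLoop rest (some c) arrobaz true true
          else VmLoop rest (some c) arrobaz point valide
        else VmLoop rest (some c) arrobaz point valide
    else
      if c = '@' then VmLoop rest (some c) arrobaz point false
      else VmLoop rest (some c) arrobaz point valide

def Verif_mail (mail : String) : Bool := VmLoop mail.toList none false false false

-- ===== PORT B =====
def Verif_mail_alt (mail : String) : Bool :=
  let p := PySem.Str.find mail "@"
  if p = -1 || PySem.Str.isIn "@" (PySem.Str.slice mail (some (p + 1)) none) then false
  else PySem.Str.isIn "." (PySem.Str.slice mail (some (p + 2)) none)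

-- ===== PRECONDITION & SPEC =====
def Spec_Verif_mail (mail : String) (out : Bool) : Prop := out = Verif_mail_alt mail
instance (mail : String) (out : Bool) : Decidable (Spec_Verif_mail mail out) := by unfold Spec_Verif_mail; infer_instance

-- ===== CLAIM (what is proved, stated in full; the proofs are below) =====
def Claim_equal_Verif_mail : Prop := ∀ (mail : String), Dom_Verif_mail mail → Spec_Verif_mail mail (Verif_mail mail)

-- ===== LEMMAS AND PROOFS =====

-- before the first '@' nothing happens
theorem vmLoop_no_at (cs : List Char) : ∀ prev, '@' ∉ cs → VmLoop cs prev false false false = false := by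
  induction cs with
  | nil => intro prev _; rfl
  | cons c rest ih =>
    intro prev h
    simp only [List.mem_cons, not_or] at h
    have hc : ¬ c = '@' := fun e => h.1 e.symm
    simp [VmLoop, hc, ih _ h.2]

theorem vmLoop_prefix (u : List Char) : ∀ (v : List Char) prev, '@' ∉ u →
    VmLoop (u ++ '@' :: v) prev false false false = VmLoop v (some '@') true false false := by
  induction u with
  | nil => intro v prev _; simp [VmLoop]
  | cons a u' ih =>
    intro v prev h
    simp only [List.mem_cons, not_or] at h
    have ha : ¬ a = '@' := fun e => h.1 e.symm
    simp [VmLoop, ha, ih _ _ h.2]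

-- once the '.' was found, a stray '@' kills validity for good
theorem vmLoop_dead (w : List Char) : ∀ prev, VmLoop w prev true true false = false := by
  induction w with
  | nil => intro prev; rfl
  | cons c rest ih => intro prev; by_cases hc : c = '@' <;> simp [VmLoop, hc, ih]

theorem vmLoop_valid (w : List Char) : ∀ prev, VmLoop w prev true true true = !(w.contains '@') := by
  induction w with
  | nil => intro prev; rfl
  | cons c rest ih =>
    intro prev
    by_cases hc : c = '@'
    · simp [VmLoop, hc, vmLoop_dead]
    · have hc' : ¬'@' = c := fun e => hc e.symm
      simp [VmLoop, hc, hc', ih]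

-- after the '@', a second '@' (anywhere) makes the result False
theorem vmLoop_second_at (w : List Char) : ∀ prev, '@' ∈ w → VmLoop w prev true false false = false := by
  induction w with
  | nil => intro _ h; simp at h
  | cons c rest ih =>
    intro prev h
    by_cases hc : c = '@'
    · simp [VmLoop, hc]
    · have hr : '@' ∈ rest := by
        rcases List.mem_cons.mp h with h' | h'
        · exact absurd h'.symm hc
        · exact h'
      by_cases hp : prev = some '@'
      · simp [VmLoop, hc, hp, ih _ hr]
      · by_cases hd : c = '.'
        · simp [VmLoop, hp, hd, vmLoop_valid, hr]
        · simp [VmLoop, hc, hp, hd, ih _ hr]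

-- after the '@' (previous char no longer '@'), with no further '@', validity = "a '.' occurs"
theorem vmLoop_scan_dot (w : List Char) : ∀ q, q ≠ '@' → '@' ∉ w →
    VmLoop w (some q) true false false = w.contains '.' := by
  induction w with
  | nil => intro q _ _; rfl
  | cons c rest ih =>
    intro q hq h
    simp only [List.mem_cons, not_or] at h
    by_cases hd : c = '.'
    · simp [VmLoop, hd, hq, vmLoop_valid, List.contains_eq_mem, h.2]
    · have hd' : ¬'.' = c := fun e => hd e.symm
      simp [VmLoop, Ne.symm h.1, hq, hd, hd', ih c (fun hc => h.1 hc.symm) h.2]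

-- the overall characterisation of A on a split cs = u ++ '@' :: v with '@' ∉ u
theorem vmLoop_char (u v : List Char) (hu : '@' ∉ u) :
    VmLoop (u ++ '@' :: v) none false false false =
      if v.contains '@' then false else (v.drop 1).contains '.' := by
  rw [vmLoop_prefix u v none hu]
  cases v with
  | nil => rfl
  | cons c w =>
    by_cases hc : c = '@'
    · simp [VmLoop, hc]
    · by_cases hw : '@' ∈ w
      · simp [VmLoop, hc, vmLoop_second_at w _ hw, List.contains_eq_mem, hw]
      · have hc' : ¬'@' = c := fun e => hc e.symm
        simp [VmLoop, hc, hc', vmLoop_scan_dot w c hc hw, List.contains_eq_mem, hw]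

theorem singleton_infix_iff {a : Char} {l : List Char} : [a] <:+: l ↔ a ∈ l := by
  constructor
  · intro h; exact h.mem (List.mem_singleton_self a)
  · intro h
    rcases List.append_of_mem h with ⟨s, t, rfl⟩
    exact ⟨s, t, by simp⟩

-- ===== VERDICT (by name: the statement is the Claim_ definition above) =====
theorem Verif_mail_spec : Claim_equal_Verif_mail := by
  intro mail _
  unfold Spec_Verif_mail Verif_mail Verif_mail_alt
  have hat : ("@" : String).toList = ['@'] := rfl
  have hdot : ("." : String).toList = ['.'] := rfl
  simp only [PySem.Str.find_eq, PySem.Str.isIn_eq, PySem.Str.toList_slice,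
    PySem.Chars.slice_eq_listSlice, hat, hdot]
  set cs := mail.toList with hcs
  by_cases hmem : '@' ∈ cs
  · have hpos : 0 ≤ PySem.Chars.find cs ['@'] := by
      rw [PySem.Chars.find_nonneg_iff, singleton_infix_iff]; exact hmem
    obtain ⟨hpre, hmin⟩ := PySem.Chars.find_spec hpos
    set p := PySem.Chars.find cs ['@'] with hp
    have hne : p ≠ -1 := by omega
    obtain ⟨v, hv⟩ : ∃ v, cs.drop p.toNat = '@' :: v := by
      rcases hpre with ⟨t, ht⟩
      exact ⟨t, ht.symm⟩
    have hu : '@' ∉ cs.take p.toNat := by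
      intro hmemu
      obtain ⟨i, hi, hg⟩ := List.getElem_of_mem hmemu
      have hilt : i < p.toNat := by
        have := hi; simp [List.length_take] at this; omega
      have hic : i < cs.length := by
        have hl : p.toNat ≤ cs.length := by
          by_contra hgt
          rw [Nat.not_le] at hgt
          have : cs.drop p.toNat = [] := List.drop_eq_nil_of_le (le_of_lt hgt)
          simp [this] at hv
        omega
      apply hmin i hilt
      refine ⟨cs.drop (i + 1), ?_⟩
      have : cs[i] = '@' := by
        rw [← List.getElem_take (h := hi)] ; exact hg
      rw [← this]
      exact (List.getElem_cons_drop ..)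
    have hsplit : cs = cs.take p.toNat ++ '@' :: v := by
      rw [← hv, List.take_append_drop]
    have hd1 : cs.drop (p + 1).toNat = v := by
      have : (p + 1).toNat = p.toNat + 1 := by omega
      rw [this, ← List.drop_drop, hv]
      rfl
    have hd2 : cs.drop (p + 2).toNat = v.drop 1 := by
      have : (p + 2).toNat = (p + 1).toNat + 1 := by omega
      rw [this, ← List.drop_drop, hd1]
    calc VmLoop cs none false false false
        = (if v.contains '@' then false else (v.drop 1).contains '.') := by
          rw [hsplit] at *
          exact vmLoop_char _ v hu
      _ = _ := by
          rw [PySem.List.slice_from cs (by omega), PySem.List.slice_from cs (by omega), hd1, hd2]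
          by_cases hvat : '@' ∈ v
          · have : PySem.Chars.isIn ['@'] v = true := by
              rw [PySem.Chars.isIn_iff_infix, singleton_infix_iff]; exact hvat
            simp [hne, this, List.contains_eq_mem, hvat]
          · have : PySem.Chars.isIn ['@'] v = false := by
              rw [PySem.Chars.isIn_eq_false_iff, singleton_infix_iff]; exact hvat
            simp only [hne, this, List.contains_eq_mem, hvat]
            by_cases hvd : '.' ∈ v.drop 1
            · have h2 : PySem.Chars.isIn ['.'] (v.drop 1) = true := by
                rw [PySem.Chars.isIn_iff_infix, singleton_infix_iff]; exact hvd
              simp [-List.drop_one, h2, hvd]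
            · have h2 : PySem.Chars.isIn ['.'] (v.drop 1) = false := by
                rw [PySem.Chars.isIn_eq_false_iff, singleton_infix_iff]; exact hvd
              simp [-List.drop_one, h2, hvd]
  · have hfind : PySem.Chars.find cs ['@'] = -1 := by
      rw [PySem.Chars.find_eq_neg_one_iff, singleton_infix_iff]; exact hmem
    simp [hfind, vmLoop_no_at cs none hmem]
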